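-- pv_equiv track=rewrite | github.com/leskovde/diacriticsPython | main.py | flip_sentences
-- ===== SOURCE A (Python) =====
-- def flip_sentences(data):
--     data_added = []
--     lines = data.split('\n')
--     for line in lines:
--         parts = line.split()
--         only_words = [part for part in parts if part.isalpha()]
--         only_words.reverse()
--         i = 0
--         result = []
--         for part in parts:
--             if not part.isalpha():
--                 result.append(part)
--             else:
--                 result.append(only_words[i])
--                 i += 1
--         data_added.append(" ".join(result))
--
--     return "\n".join(data_added)
-- ===== SOURCE B (Python) =====
-- def _flip(parts):
--     # recursively reverse the alphabetic subsequence by swapping the two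
--     # outermost alphabetic words and recursing on what lies between them
--     if not parts:
--         return []
--     if not parts[0].isalpha():
--         return [parts[0]] + _flip(parts[1:])
--     if not parts[-1].isalpha():
--         return _flip(parts[:-1]) + [parts[-1]]
--     if len(parts) == 1:
--         return parts
--     return [parts[-1]] + _flip(parts[1:-1]) + [parts[0]]
--
--
-- def flip_sentences(data):
--     return "\n".join(" ".join(_flip(line.split())) for line in data.split("\n"))
-- ===== Notes on version B (the rewrite author's own statement) =====
-- stated objective: alternative
-- what changed: Per line, instead of building a filtered list of alphabetic words, reversing it and threading an index through a second pass, B recursively swaps the two outermost alphabetic words and recurses on the sublist between them, with no auxiliary word list.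
import Mathlib
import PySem

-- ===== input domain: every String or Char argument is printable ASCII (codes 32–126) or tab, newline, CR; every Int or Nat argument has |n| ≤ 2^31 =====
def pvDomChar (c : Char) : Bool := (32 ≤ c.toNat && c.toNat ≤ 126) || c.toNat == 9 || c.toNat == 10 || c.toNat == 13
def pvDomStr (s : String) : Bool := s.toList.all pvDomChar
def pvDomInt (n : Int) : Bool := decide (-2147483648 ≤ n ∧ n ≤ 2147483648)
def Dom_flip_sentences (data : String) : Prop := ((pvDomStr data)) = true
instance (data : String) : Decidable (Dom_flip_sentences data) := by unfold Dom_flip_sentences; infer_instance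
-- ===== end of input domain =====

-- B replaces A's filter+reverse+index-threading second pass by a recursion that swaps the
-- two outermost alphabetic words per line; same cost, no auxiliary word list (objective: alternative).

-- ===== PORT A =====
def flip_sentences (data : String) : String :=
  let lines := (PySem.Str.split? data "\n").getD []   -- sep "\n" ≠ "", split? is always some
  let data_added := lines.foldl (fun acc line =>
    let parts := PySem.Str.split₀ line
    let only_words := (parts.filter (fun p => PySem.Str.strIsalpha p)).reverse
    let st := parts.foldl (fun (st : Int × List String) part =>
      if ¬ PySem.Str.strIsalpha part then (st.1, st.2 ++ [part])
      else (st.1 + 1, st.2 ++ [PySem.List.pyGetD only_words st.1 ""])) (0, [])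
    acc ++ [PySem.Str.join " " st.2]) []
  PySem.Str.join "\n" data_added

-- ===== PORT B =====
def flipCore (parts : List String) : List String :=
  match parts with
  | [] => []
  | p :: rest =>
    if ¬ PySem.Str.strIsalpha p then p :: flipCore rest
    else
      match rest with
      | [] => [p]   -- parts[-1] = p is alphabetic, len(parts) == 1
      | y :: t =>
        let q := (y :: t).getLast (by simp)
        if ¬ PySem.Str.strIsalpha q then flipCore (p :: (y :: t).dropLast) ++ [q]
        else q :: (flipCore ((y :: t).dropLast) ++ [p])
  termination_by parts.length
  decreasing_by all_goals simp [List.length_dropLast]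

def flip_sentences_alt (data : String) : String :=
  PySem.Str.join "\n" (((PySem.Str.split? data "\n").getD []).map (fun line =>
    PySem.Str.join " " (flipCore (PySem.Str.split₀ line))))

-- ===== PRECONDITION & SPEC =====
def Spec_flip_sentences (data : String) (out : String) : Prop := out = flip_sentences_alt data
instance (data : String) (out : String) : Decidable (Spec_flip_sentences data out) := by unfold Spec_flip_sentences; infer_instance

-- ===== CLAIM (what is proved, stated in full; the proofs are below) =====
def Claim_equal_flip_sentences : Prop := ∀ (data : String), Dom_flip_sentences data → Spec_flip_sentences data (flip_sentences data)

-- ===== LEMMAS AND PROOFS =====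

-- pop-style assignment: replace each alphabetic word by the next word from ws
def assign : List String → List String → List String
  | [], _ => []
  | p :: ps, ws =>
    if PySem.Str.strIsalpha p then ws.headD p :: assign ps ws.tail
    else p :: assign ps ws

lemma assign_append_nonalpha (q : String) (hq : PySem.Chars.strIsalpha q.toList = false) :
    ∀ (xs ws : List String), assign (xs ++ [q]) ws = assign xs ws ++ [q] := by
  intro xs
  induction xs with
  | nil => intro ws; simp [assign, hq]
  | cons x xs ih =>
    intro ws
    by_cases hx : PySem.Chars.strIsalpha x.toList <;> simp [assign, hx, ih]

lemma assign_append_split :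
    ∀ (xs ws ys ws' : List String),
      (xs.filter (fun p => PySem.Str.strIsalpha p)).length = ws.length →
      assign (xs ++ ys) (ws ++ ws') = assign xs ws ++ assign ys ws' := by
  intro xs
  induction xs with
  | nil =>
    intro ws ys ws' h
    simp [List.filter] at h
    simp [List.length_eq_zero_iff.mp h.symm, assign]
  | cons x xs ih =>
    intro ws ys ws' h
    by_cases hx : PySem.Chars.strIsalpha x.toList
    · simp [hx] at h
      match ws with
      | [] => simp at h
      | w :: ws1 =>
        simp at h
        simp [assign, hx, ih _ _ _ h]
    · simp [hx] at h
      simp [assign, hx, ih _ _ _ h]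

-- shape lemmas for flipCore
lemma flipCore_nil : flipCore [] = [] := by rw [flipCore.eq_def]

lemma flipCore_cons_nonalpha (p : String) (rest : List String)
    (hp : PySem.Chars.strIsalpha p.toList = false) :
    flipCore (p :: rest) = p :: flipCore rest := by
  rw [flipCore.eq_def]; simp [hp]

lemma flipCore_single_alpha (p : String) (hp : PySem.Chars.strIsalpha p.toList = true) :
    flipCore [p] = [p] := by
  rw [flipCore.eq_def]; simp [hp]

lemma flipCore_concat_nonalpha (p : String) (m : List String) (q : String)
    (hp : PySem.Chars.strIsalpha p.toList = true)
    (hq : PySem.Chars.strIsalpha q.toList = false) :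
    flipCore (p :: (m ++ [q])) = flipCore (p :: m) ++ [q] := by
  rw [flipCore.eq_def]
  cases m with
  | nil => simp [hp, hq]
  | cons a m' =>
    have h1 : (a :: (m' ++ [q])).getLast (by simp) = q := by
      show ((a :: m') ++ [q]).getLast (by simp) = q
      exact List.getLast_concat
    have h2 : (a :: (m' ++ [q])).dropLast = a :: m' := by
      show ((a :: m') ++ [q]).dropLast = a :: m'
      exact List.dropLast_concat ..
    simp [hp, hq, h1, h2]

lemma flipCore_concat_swap (p : String) (m : List String) (q : String)
    (hp : PySem.Chars.strIsalpha p.toList = true)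
    (hq : PySem.Chars.strIsalpha q.toList = true) :
    flipCore (p :: (m ++ [q])) = q :: (flipCore m ++ [p]) := by
  rw [flipCore.eq_def]
  cases m with
  | nil => simp [hp, hq, flipCore_nil]
  | cons a m' =>
    have h1 : (a :: (m' ++ [q])).getLast (by simp) = q := by
      show ((a :: m') ++ [q]).getLast (by simp) = q
      exact List.getLast_concat
    have h2 : (a :: (m' ++ [q])).dropLast = a :: m' := by
      show ((a :: m') ++ [q]).dropLast = a :: m'
      exact List.dropLast_concat ..
    simp [hp, hq, h1, h2]

-- flipCore computes the pop-style assignment from the reversed alphabetic sublist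
lemma flipCore_eq_assign (parts : List String) :
    flipCore parts = assign parts ((parts.filter (fun p => PySem.Str.strIsalpha p)).reverse) := by
  induction hn : parts.length using Nat.strong_induction_on generalizing parts with
  | _ n ih =>
  match parts with
  | [] => simp [flipCore_nil, assign]
  | p :: rest =>
    by_cases hp : PySem.Chars.strIsalpha p.toList
    · rcases List.eq_nil_or_concat rest with h | ⟨m, q, hm⟩
      · subst h
        rw [flipCore_single_alpha p hp]
        simp [assign, hp]
      · rw [List.concat_eq_append] at hm
        subst hm
        by_cases hq : PySem.Chars.strIsalpha q.toList
        · -- both ends alphabetic: swap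
          have hlen : m.length < n := by subst hn; simp
          rw [flipCore_concat_swap p m q hp hq, ih m.length hlen m rfl]
          have hfil : ((p :: (m ++ [q])).filter (fun p => PySem.Str.strIsalpha p)).reverse
              = q :: ((m.filter (fun p => PySem.Str.strIsalpha p)).reverse ++ [p]) := by
            simp [List.filter_append, hp, hq]
          rw [hfil, show p :: (m ++ [q]) = p :: (m ++ [q]) from rfl]
          rw [show assign (p :: (m ++ [q])) (q :: ((m.filter (fun p => PySem.Str.strIsalpha p)).reverse ++ [p]))
              = q :: assign (m ++ [q]) ((m.filter (fun p => PySem.Str.strIsalpha p)).reverse ++ [p]) by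
            simp [assign, hp]]
          rw [assign_append_split m _ [q] [p] (by simp)]
          simp [assign, hq]
        · -- last word not alphabetic: peel it off
          have hplen : (p :: m).length < n := by subst hn; simp
          rw [flipCore_concat_nonalpha p m q hp (by simpa using hq),
              ih (p :: m).length hplen (p :: m) rfl]
          rw [show p :: (m ++ [q]) = (p :: m) ++ [q] from rfl,
              assign_append_nonalpha q (by simpa using hq)]
          congr 2
          simp [List.filter_append, List.filter_cons, hq]
    · have hlen : rest.length < n := by subst hn; simp
      rw [flipCore_cons_nonalpha p rest (by simpa using hp), ih rest.length hlen rest rfl]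
      simp [assign, hp]

-- characterise A's index-threading fold as the pop-style assignment
lemma foldA_eq_assign (ow : List String) :
    ∀ (parts : List String) (i : Nat) (acc : List String),
      i + (parts.filter (fun p => PySem.Str.strIsalpha p)).length ≤ ow.length →
      parts.foldl (fun (st : Int × List String) part =>
          if ¬ PySem.Str.strIsalpha part then (st.1, st.2 ++ [part])
          else (st.1 + 1, st.2 ++ [PySem.List.pyGetD ow st.1 ""])) ((i : Int), acc)
        = (((i + (parts.filter (fun p => PySem.Str.strIsalpha p)).length : Nat) : Int),
           acc ++ assign parts (ow.drop i)) := by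
  intro parts
  induction parts with
  | nil => intro i acc _; simp [assign]
  | cons p ps ih =>
    intro i acc h
    rw [List.foldl_cons]
    by_cases hp : PySem.Str.strIsalpha p
    · have hp' : PySem.Chars.strIsalpha p.toList = true := by simpa using hp
      have h' : i + (ps.filter (fun p => PySem.Str.strIsalpha p)).length + 1 ≤ ow.length := by
        simp only [List.filter_cons, hp, if_pos, List.length_cons] at h
        omega
      have hi : i < ow.length := by omega
      have hget : PySem.List.pyGetD ow (i : Int) "" = ow[i] := by
        simp [List.getD_eq_getElem?_getD, hi]
      have hstep : ((i : Int) + 1) = ((i + 1 : Nat) : Int) := by push_cast; ring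
      rw [if_neg (by simp [hp']), hget, hstep, ih (i + 1) (acc ++ [ow[i]]) (by omega)]
      have hdrop : ow.drop i = ow[i] :: ow.drop (i + 1) := List.drop_eq_getElem_cons hi
      rw [show assign (p :: ps) (ow.drop i) = ow[i] :: assign ps (ow.drop (i + 1)) by
        rw [hdrop]; simp [assign, hp', List.getElem?_eq_getElem hi]]
      rw [Prod.mk.injEq]
      constructor
      · simp only [List.filter_cons, hp, if_pos, List.length_cons]
        push_cast; ring
      · simp
    · have hp' : PySem.Chars.strIsalpha p.toList = false := by simpa using hp
      have h' : i + (ps.filter (fun p => PySem.Str.strIsalpha p)).length ≤ ow.length := by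
        simpa [List.filter_cons, hp'] using h
      rw [if_pos (by simp [hp']), ih i (acc ++ [p]) h']
      simp [assign, hp']

-- per-line agreement
lemma line_eq (parts : List String) :
    (parts.foldl (fun (st : Int × List String) part =>
        if ¬ PySem.Str.strIsalpha part then (st.1, st.2 ++ [part])
        else (st.1 + 1, st.2 ++
          [PySem.List.pyGetD ((parts.filter (fun p => PySem.Str.strIsalpha p)).reverse) st.1 ""]))
      (0, [])).2 = flipCore parts := by
  have h := foldA_eq_assign ((parts.filter (fun p => PySem.Str.strIsalpha p)).reverse)
    parts 0 [] (by simp)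
  rw [Nat.cast_zero] at h
  rw [h, flipCore_eq_assign]
  simp

-- ===== VERDICT (by name: the statement is the Claim_ definition above) =====
theorem flip_sentences_spec : Claim_equal_flip_sentences := by
  intro data _
  show flip_sentences data = flip_sentences_alt data
  simp only [flip_sentences, flip_sentences_alt]
  rw [PySem.List.foldl_append_singleton_eq_map]
  congr 1
  apply List.map_congr_left
  intro line _
  rw [← line_eq (PySem.Str.split₀ line)]
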